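-- pv_equiv track=rewrite | github.com/EyalSol2005/EyalMamas | Part2 (Python)/task3.py | is_sorted_polyndrom
-- ===== SOURCE A (Python) =====
-- def is_sorted_polyndrom(word: str) -> bool:
--     """
--   The function checks if the given word is a sorted polyndrom
--
--   Args:
--   word (str): The word to check
--
--   Returns:
--   bool: True if sorted polyndrom, of False if isn't.
--   """
--     for i in range(len(word)):  # Loop over the word
--
--         char_start = word[i]
--         char_end = word[len(word) - 1 - i]  # The mirrored char from the end
--
--         if char_start != char_end:  # The char is not the same as the mirrored char
--             return False
--
--         if i > 0 and word[i] < word[i - 1]:  # The chars aren't sorted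
--             return False
--
--         if (i == len(word) - 1 - i) or (
--                 i + 1 > len(word) - i):  # Reached the middle or the next step will switch the chars
--             return True
--     return True
-- ===== SOURCE B (Python) =====
-- def is_sorted_polyndrom(word: str) -> bool:
--     """Checks if the given word is a sorted palindrome: two independent
--     whole-string checks instead of one interleaved index loop."""
--     half = word[:(len(word) + 1) // 2]
--     return word == word[::-1] and list(half) == sorted(half)
-- ===== Notes on version B (the rewrite author's own statement) =====
-- stated objective: simpler
-- what changed: Replaces A's single interleaved index loop with early returns by two independent whole-value checks: word equals its reverse, and the first ceil(n/2) characters equal their sorted order.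
import Mathlib
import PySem

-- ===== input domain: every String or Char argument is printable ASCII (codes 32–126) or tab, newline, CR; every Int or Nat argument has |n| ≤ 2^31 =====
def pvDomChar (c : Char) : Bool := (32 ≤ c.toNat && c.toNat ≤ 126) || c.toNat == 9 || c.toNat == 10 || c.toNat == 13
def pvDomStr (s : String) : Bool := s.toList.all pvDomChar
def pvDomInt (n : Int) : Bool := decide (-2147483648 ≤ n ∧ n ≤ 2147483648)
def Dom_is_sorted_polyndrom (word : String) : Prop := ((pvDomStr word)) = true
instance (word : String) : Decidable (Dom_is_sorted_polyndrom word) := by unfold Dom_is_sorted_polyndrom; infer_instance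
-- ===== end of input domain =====

-- B replaces A's single interleaved index loop by two independent whole-value
-- checks (word equals its reverse; the first ceil(n/2) characters equal their
-- sorted order) — objective: simpler.

-- ===== PORT A =====
-- the for-i-in-range(len(word)) loop with its early returns, as structural
-- recursion on the remaining indices; all Python indices are in range here
-- (0 ≤ i < n, 0 ≤ n-1-i < n, and i-1 only read when i > 0), so plain getElem
-- with bound proofs is exact.
def pvLoopA (cs : List Char) (i : Nat) : Bool :=
  if h : i < cs.length then
    let n := cs.length
    let char_start := cs[i]
    let char_end := cs[n - 1 - i]'(by omega)
    if char_start ≠ char_end then false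
    else if 0 < i ∧ cs[i] < cs[i - 1]'(by omega) then false
    else if i = n - 1 - i ∨ i + 1 > n - i then true
    else pvLoopA cs (i + 1)
  else true
termination_by cs.length - i

def is_sorted_polyndrom (word : String) : Bool :=
  pvLoopA word.toList 0

-- ===== PORT B =====
def is_sorted_polyndrom_alt (word : String) : Bool :=
  let cs := word.toList
  let half := cs.take ((cs.length + 1) / 2)      -- word[:(len(word)+1)//2]
  (cs == cs.reverse)                             -- word == word[::-1]
    && (half == PySem.List.sorted half (fun x => x) false)  -- list(half) == sorted(half)

-- ===== PRECONDITION & SPEC =====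
def Spec_is_sorted_polyndrom (word : String) (out : Bool) : Prop := out = is_sorted_polyndrom_alt word
instance (word : String) (out : Bool) : Decidable (Spec_is_sorted_polyndrom word out) := by unfold Spec_is_sorted_polyndrom; infer_instance

-- ===== CLAIM (what is proved, stated in full; the proofs are below) =====
def Claim_equal_is_sorted_polyndrom : Prop := ∀ (word : String), Dom_is_sorted_polyndrom word → Spec_is_sorted_polyndrom word (is_sorted_polyndrom word)

-- ===== LEMMAS AND PROOFS =====

-- the checks A performs at index k (mirror equality; order w.r.t. the previous char)
def pvChecks (cs : List Char) (k : Nat) (hk : k < cs.length) : Prop :=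
  cs[k] = cs[cs.length - 1 - k]'(by omega) ∧
    (0 < k → cs[k - 1]'(by omega) ≤ cs[k])

-- characterisation of A's loop from index i (for 0 < n, i ≤ n/2):
-- true iff every remaining index up to the middle n/2 passes its checks
lemma pvLoopA_iff (cs : List Char) (hn : 0 < cs.length) :
    ∀ i, i ≤ cs.length / 2 →
      (pvLoopA cs i = true ↔
        ∀ k (_ : i ≤ k) (hk2 : k ≤ cs.length / 2), pvChecks cs k (by omega)) := by
  intro i
  induction' hd : cs.length / 2 - i using Nat.strong_induction_on with d ih generalizing i
  intro hi
  have hilt : i < cs.length := by omega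
  rw [pvLoopA]
  simp only [dif_pos hilt]
  by_cases hmir : cs[i] = cs[cs.length - 1 - i]'(by omega)
  case neg =>
    rw [if_pos hmir]
    constructor
    · intro h; cases h
    · intro h; exact absurd ((h i le_rfl hi).1) hmir
  case pos =>
    rw [if_neg (by simp [hmir])]
    by_cases hsrt : 0 < i ∧ cs[i] < cs[i - 1]'(by omega)
    · rw [if_pos hsrt]
      constructor
      · intro h; cases h
      · intro h
        have := (h i le_rfl hi).2 hsrt.1
        exact absurd hsrt.2 (not_lt.mpr this)
    · rw [if_neg hsrt]
      have hchk : pvChecks cs i hilt :=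
        ⟨hmir, fun hpos => not_lt.mp (fun hlt => hsrt ⟨hpos, hlt⟩)⟩
      by_cases hstop : i = cs.length - 1 - i ∨ i + 1 > cs.length - i
      · rw [if_pos hstop]
        have hieq : i = cs.length / 2 := by omega
        constructor
        · intro _ k hk1 hk2
          have hki : k = i := by omega
          subst hki; exact hchk
        · intro _; rfl
      · rw [if_neg hstop]
        have hlt2 : i < cs.length / 2 := by omega
        rw [ih (cs.length / 2 - (i + 1)) (by omega) (i + 1) rfl (by omega)]
        constructor
        · intro h k hk1 hk2
          rcases Nat.eq_or_lt_of_le hk1 with heq | hlt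
          · subst heq; exact hchk
          · exact h k hlt hk2
        · intro h k hk1 hk2
          exact h k (by omega) hk2

-- palindrome: list equality with the reverse ↔ pointwise mirror equality
lemma pal_iff (cs : List Char) :
    cs = cs.reverse ↔ ∀ k (hk : k < cs.length), cs[k] = cs[cs.length - 1 - k]'(by omega) := by
  constructor
  · intro h k hk
    have h1 : cs[k] = cs.reverse[k]'(by simpa using hk) := List.getElem_of_eq h hk
    rw [h1, List.getElem_reverse]
  · intro h
    apply List.ext_getElem (by simp)
    intro k hk hk'
    rw [List.getElem_reverse]
    exact h k hk

-- adjacent non-decreasing ⇒ monotone over indices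
lemma adj_mono (l : List Char) (h : ∀ k (hk : k + 1 < l.length), l[k] ≤ l[k + 1]) :
    ∀ j (hj : j < l.length) i (hij : i ≤ j), l[i]'(by omega) ≤ l[j] := by
  intro j
  induction j with
  | zero => intro hj i hij; interval_cases i; exact le_rfl
  | succ m ihm =>
    intro hj i hij
    rcases Nat.eq_or_lt_of_le hij with heq | hlt
    · subst heq; exact le_rfl
    · exact le_trans (ihm (by omega) i (by omega)) (h m hj)

-- a list equals its (stable, identity-key) sort ↔ adjacent elements are non-decreasing
lemma eq_sorted_iff (l : List Char) :
    l = PySem.List.sorted l (fun x => x) false ↔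
      ∀ k (hk : k + 1 < l.length), l[k] ≤ l[k + 1] := by
  constructor
  · intro h k hk
    have hp : l.Pairwise (fun a b => a ≤ b) := by
      rw [h]; exact PySem.List.sorted_pairwise l (fun x => x)
    rw [List.pairwise_iff_getElem] at hp
    exact hp k (k + 1) (by omega) hk (by omega)
  · intro h
    have hp : l.Pairwise (fun a b => (fun x => x) a ≤ (fun x => x) b) := by
      rw [List.pairwise_iff_getElem]
      intro p q hp hq hpq
      exact adj_mono l h q hq p (by omega)
    exact (PySem.List.sorted_eq_self_of_pairwise l (fun x => x) hp).symm

-- ===== VERDICT (by name: the statement is the Claim_ definition above) =====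
theorem is_sorted_polyndrom_spec : Claim_equal_is_sorted_polyndrom := by
  intro word _
  unfold Spec_is_sorted_polyndrom is_sorted_polyndrom is_sorted_polyndrom_alt
  set cs := word.toList with hcs
  by_cases hn : cs.length = 0
  · rw [List.length_eq_zero_iff] at hn
    rw [hn, pvLoopA]; simp [PySem.List.sorted]
  · have hn' : 0 < cs.length := by omega
    show pvLoopA cs 0 = ((cs == cs.reverse) &&
      ((cs.take ((cs.length + 1) / 2)) ==
        PySem.List.sorted (cs.take ((cs.length + 1) / 2)) (fun x => x) false))
    rw [Bool.eq_iff_iff]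
    simp only [Bool.and_eq_true, beq_iff_eq]
    rw [pvLoopA_iff cs hn' 0 (by omega), pal_iff,
        eq_sorted_iff]
    have hlenh : (cs.take ((cs.length + 1) / 2)).length = (cs.length + 1) / 2 := by
      rw [List.length_take]; omega
    constructor
    · intro h
      refine ⟨?_, ?_⟩
      · intro k hk
        by_cases hk2 : k ≤ cs.length / 2
        · exact (h k (by omega) hk2).1
        · have hj : cs.length - 1 - k ≤ cs.length / 2 := by omega
          have := (h (cs.length - 1 - k) (by omega) hj).1
          have hidx : cs.length - 1 - (cs.length - 1 - k) = k := by omega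
          simp only [hidx] at this
          exact this.symm
      · intro k hk
        rw [hlenh] at hk
        have h1 : k + 1 ≤ cs.length / 2 := by omega
        have := (h (k + 1) (by omega) h1).2 (by omega)
        simp only [Nat.add_sub_cancel] at this
        rw [List.getElem_take, List.getElem_take]
        exact this
    · rintro ⟨hpal, hsort⟩ k hk1 hk2
      refine ⟨hpal k (by omega), ?_⟩
      intro hpos
      by_cases hkm : k < (cs.length + 1) / 2
      · have := hsort (k - 1) (by rw [hlenh]; omega)
        rw [List.getElem_take, List.getElem_take] at this
        simpa [Nat.sub_add_cancel hpos] using this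
      · -- even length, k = n/2: mirror gives cs[k] = cs[k-1]
        have hke : cs.length - 1 - k = k - 1 := by omega
        have := hpal k (by omega)
        simp only [hke] at this
        exact le_of_eq this.symm
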